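-- pv_equiv track=rewrite | github.com/Haksell/codeforces | 1496B.py | f
-- ===== SOURCE A (Python) =====
-- from collections import Counter
-- from itertools import count
--
-- def f(n, k, lst):
--     c = Counter(lst)
--     a = max(c)
--     b = next(i for i in count() if i not in c)
--
--     for _ in range(k):
--         new = a + b + 1 >> 1
--         a = max(a, new)
--         if new == b:
--             b = next(i for i in count(b + 1) if i not in c)
--         c[new] += 1
--
--     return len(c)
-- ===== SOURCE B (Python) =====
-- def f(n, k, lst):
--     s = set(lst)
--     a = max(s)
--     b = 0
--     while b in s:
--         b += 1
--     if k <= 0: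
--         return len(s)
--     if b > a:
--         return len(s) + k
--     return len(s) + (0 if (a + b + 1) // 2 in s else 1)
-- ===== Notes on version B (the rewrite author's own statement) =====
-- stated objective: alternative
-- what changed: Replaces the k-iteration simulation of the max/mex averaging process by a closed form: if mex > max every operation inserts a fresh element (answer len+k), otherwise only the first operation can insert ceil((max+mex)/2) and the state is then fixed.
import Mathlib
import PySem

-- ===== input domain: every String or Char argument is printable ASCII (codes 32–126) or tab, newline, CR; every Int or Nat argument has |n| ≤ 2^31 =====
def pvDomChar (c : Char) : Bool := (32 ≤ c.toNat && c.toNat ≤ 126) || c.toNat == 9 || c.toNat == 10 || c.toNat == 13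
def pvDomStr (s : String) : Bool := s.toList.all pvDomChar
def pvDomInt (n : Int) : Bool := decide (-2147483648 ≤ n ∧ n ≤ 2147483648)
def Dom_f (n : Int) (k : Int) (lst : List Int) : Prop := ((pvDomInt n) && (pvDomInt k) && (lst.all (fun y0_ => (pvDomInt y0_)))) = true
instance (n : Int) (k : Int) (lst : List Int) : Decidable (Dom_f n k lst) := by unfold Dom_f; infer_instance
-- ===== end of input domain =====

-- B replaces A's k-iteration simulation by a closed form over max and mex (return value only).

-- ===== PORT A =====
-- next(i for i in count(t) if i not in s): first integer ≥ t not in s; fuel s.length+1 always suffices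
def mexFrom (s : List Int) : Int → Nat → Int
  | t, 0 => t
  | t, fuel+1 => if t ∈ s then mexFrom s (t+1) fuel else t

-- the 'for _ in range(k)' loop of A; 'a + b + 1 >> 1' is floor((a+b+1)/2) = PySem.Int.floordiv
def fLoop : PySem.Dict Int Int → Int → Int → Nat → Int × Int × PySem.Dict Int Int
  | c, a, b, 0 => (a, b, c)
  | c, a, b, j+1 =>
      let m := PySem.Int.floordiv (a + b + 1) 2
      fLoop (c.modify m 0 (· + 1)) (max a m)
        (if m = b then mexFrom c.keys (b + 1) (c.keys.length + 1) else b) j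

def f (n : Int) (k : Int) (lst : List Int) : Int :=
  let c := PySem.Dict.counter lst
  -- max(c): none = ValueError on an empty Counter (excluded by Pre_f)
  (PySem.List.max? c.keys (fun x => x)).elim 0 (fun a =>
    (((fLoop c a (mexFrom c.keys 0 (c.keys.length + 1)) k.toNat).2.2).keys.length : Int))

-- ===== PORT B =====
def f_alt (n : Int) (k : Int) (lst : List Int) : Int :=
  let s : PySem.Set Int := PySem.Set.ofList lst
  -- max(s): none = ValueError on an empty set (excluded by Pre_f)
  (PySem.List.max? s (fun x => x)).elim 0 (fun a =>
    let b := mexFrom s 0 (s.length + 1)  -- the 'while b in s: b += 1' scan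
    if k ≤ 0 then (s.length : Int)
    else if a < b then (s.length : Int) + k
    else (s.length : Int) +
      (if PySem.Set.contains s (PySem.Int.floordiv (a + b + 1) 2) then 0 else 1))

-- ===== PRECONDITION & SPEC =====
-- Pre_f excludes only the empty list, on which A raises ValueError (max of an empty Counter).
def Pre_f (n : Int) (k : Int) (lst : List Int) : Prop := lst ≠ []
instance (n : Int) (k : Int) (lst : List Int) : Decidable (Pre_f n k lst) := by unfold Pre_f; infer_instance
def pvWitness_f : Int × Int × List Int := (3, 2, [0, 1, 4])

def Spec_f (n : Int) (k : Int) (lst : List Int) (out : Int) : Prop := out = f_alt n k lst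
instance (n : Int) (k : Int) (lst : List Int) (out : Int) : Decidable (Spec_f n k lst out) := by unfold Spec_f; infer_instance

-- ===== CLAIM (what is proved, stated in full; the proofs are below) =====
def Claim_equal_f : Prop := ∀ (n : Int) (k : Int) (lst : List Int), Dom_f n k lst → Pre_f n k lst → Spec_f n k lst (f n k lst)

-- ===== LEMMAS AND PROOFS =====

lemma filter_le_split (s : List Int) (t : Int) :
    (s.filter (fun x => decide (t ≤ x))).length
      = (s.filter (fun x => decide (t + 1 ≤ x))).length + s.count t := by
  induction s with
  | nil => simp
  | cons a s ih =>
      simp only [List.filter_cons, List.count_cons]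
      by_cases h1 : t ≤ a <;> by_cases h2 : t + 1 ≤ a <;> by_cases h3 : a = t <;>
        first
          | omega
          | (simp [h1, h2, h3, ih] <;> omega)

lemma mexFrom_spec (s : List Int) : ∀ (fuel : Nat) (t : Int),
    (s.filter (fun x => decide (t ≤ x))).length < fuel →
    mexFrom s t fuel ∉ s ∧ t ≤ mexFrom s t fuel := by
  intro fuel
  induction fuel with
  | zero => intro t h; omega
  | succ n ih =>
      intro t h
      by_cases ht : t ∈ s
      · have hc : 0 < s.count t := List.count_pos_iff.mpr ht
        have hlen : (s.filter (fun x => decide (t + 1 ≤ x))).length < n := by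
          have := filter_le_split s t; omega
        have := ih (t + 1) hlen
        simp only [mexFrom, if_pos ht]
        exact ⟨this.1, by omega⟩
      · simp only [mexFrom, if_neg ht]
        exact ⟨ht, le_refl t⟩

lemma set_add_idem (s : PySem.Set Int) (x : Int) :
    PySem.Set.add (PySem.Set.add s x) x = PySem.Set.add s x := by
  by_cases h : x ∈ s
  · rw [PySem.Set.add_of_mem h, PySem.Set.add_of_mem h]
  · rw [PySem.Set.add_of_not_mem h, PySem.Set.add_of_mem (by simp)]

lemma keys_modify_one (c : PySem.Dict Int Int) (m : Int) :
    (c.modify m 0 (· + 1)).keys = PySem.Set.add c.keys m := by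
  have := PySem.Dict.keys_foldl_modify (l := [m]) (d := c) (d0 := (0 : Int))
    (f := fun _ _ => (· + 1))
  simpa [PySem.Set.update] using this

lemma fLoop_keys_lt (a b : Int) (hba : b < a) :
    ∀ (j : Nat) (c : PySem.Dict Int Int), j ≠ 0 →
      ((fLoop c a b j).2.2).keys
        = PySem.Set.add c.keys (PySem.Int.floordiv (a + b + 1) 2) := by
  have hm1 : b < PySem.Int.floordiv (a + b + 1) 2 := by
    have h2 : (0:Int) < 2 := by norm_num
    have := (PySem.Int.le_floordiv_iff_mul_le (a := a + b + 1) (b := 2) (q := b + 1) h2)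
    omega
  have hm2 : PySem.Int.floordiv (a + b + 1) 2 ≤ a := by
    have h2 : (0:Int) < 2 := by norm_num
    have := (PySem.Int.floordiv_lt_iff_lt_mul (a := a + b + 1) (b := 2) (q := a + 1) h2)
    omega
  intro j
  induction j with
  | zero => intro c h; exact absurd rfl h
  | succ i ih =>
      intro c _
      simp only [fLoop]
      rw [max_eq_left hm2, if_neg (by omega : ¬ PySem.Int.floordiv (a + b + 1) 2 = b)]
      cases i with
      | zero => simp only [fLoop]; exact keys_modify_one c _
      | succ i' =>
          rw [ih _ (Nat.succ_ne_zero i'), keys_modify_one, set_add_idem]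

lemma fLoop_len_gt : ∀ (j : Nat) (c : PySem.Dict Int Int) (a b : Int),
    (∀ x ∈ c.keys, x ≤ a) → a < b → b ∉ c.keys →
    ((fLoop c a b j).2.2).keys.length = c.keys.length + j := by
  intro j
  induction j with
  | zero => intro c a b _ _ _; rfl
  | succ i ih =>
      intro c a b hmax hab hbmem
      have h2 : (0:Int) < 2 := by norm_num
      set m := PySem.Int.floordiv (a + b + 1) 2 with hm
      have hm1 : a < m := by
        have := (PySem.Int.le_floordiv_iff_mul_le (a := a + b + 1) (b := 2) (q := a + 1) h2)
        omega
      have hm2 : m ≤ b := by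
        have := (PySem.Int.floordiv_lt_iff_lt_mul (a := a + b + 1) (b := 2) (q := b + 1) h2)
        omega
      have hmmem : m ∉ c.keys := fun h => absurd (hmax m h) (by omega)
      have hkeys : (c.modify m 0 (· + 1)).keys = c.keys ++ [m] := by
        rw [keys_modify_one, PySem.Set.add_of_not_mem hmmem]
      simp only [fLoop, ← hm]
      rw [max_eq_right (le_of_lt hm1)]
      by_cases heq : m = b
      · rw [if_pos heq]
        have hfuel : (c.keys.filter (fun x => decide (b + 1 ≤ x))).length < c.keys.length + 1 := by
          have := List.length_filter_le (fun x => decide (b + 1 ≤ x)) c.keys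
          omega
        obtain ⟨hb1, hb2⟩ := mexFrom_spec c.keys (c.keys.length + 1) (b + 1) hfuel
        rw [ih (c.modify m 0 (· + 1)) m (mexFrom c.keys (b + 1) (c.keys.length + 1))
              (by intro x hx; rw [hkeys] at hx
                  rcases List.mem_append.mp hx with h | h
                  · exact le_trans (hmax x h) (le_of_lt hm1)
                  · simp at h; omega)
              (by omega)
              (by rw [hkeys]; intro hmem
                  rcases List.mem_append.mp hmem with h | h
                  · exact hb1 h
                  · simp at h; omega)]
        rw [hkeys]; simp; omega
      · rw [if_neg heq]
        have hmb : m < b := lt_of_le_of_ne hm2 heq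
        rw [ih (c.modify m 0 (· + 1)) m b
              (by intro x hx; rw [hkeys] at hx
                  rcases List.mem_append.mp hx with h | h
                  · exact le_trans (hmax x h) (le_of_lt hm1)
                  · simp at h; omega)
              hmb
              (by rw [hkeys]; intro hmem
                  rcases List.mem_append.mp hmem with h | h
                  · exact hbmem h
                  · simp at h; omega)]
        rw [hkeys]; simp; omega

-- ===== VERDICT (by name: the statement is the Claim_ definition above) =====
theorem f_spec : Claim_equal_f := by
  intro n k lst _ hpre
  unfold Spec_f f f_alt
  simp only [PySem.Dict.keys_counter]
  set S : PySem.Set Int := PySem.Set.ofList lst with hS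
  have hSne : S ≠ [] := by
    cases lst with
    | nil => exact absurd rfl hpre
    | cons x xs =>
        intro h
        have : x ∈ S := (PySem.Set.mem_ofList (x :: xs) x).mpr List.mem_cons_self
        rw [h] at this; exact absurd this List.not_mem_nil
  obtain ⟨a0, ha⟩ : ∃ a0, PySem.List.max? S (fun x => x) = some a0 := by
    cases hmx : PySem.List.max? S (fun x => x) with
    | none => exact absurd ((PySem.List.max?_eq_none_iff S (fun x => x)).mp hmx) hSne
    | some a0 => exact ⟨a0, rfl⟩
  rw [ha]
  simp only [Option.elim_some]
  have ha0mem : a0 ∈ S := PySem.List.max?_mem ha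
  have ha0max : ∀ y ∈ S, y ≤ a0 := fun y hy => PySem.List.max?_isMax ha y hy
  have hfuel0 : (S.filter (fun x => decide ((0:Int) ≤ x))).length < S.length + 1 := by
    have := List.length_filter_le (fun x => decide ((0:Int) ≤ x)) S
    omega
  obtain ⟨hb0, hb0le⟩ := mexFrom_spec S (S.length + 1) 0 hfuel0
  set b0 := mexFrom S 0 (S.length + 1) with hb0def
  by_cases hk : k ≤ 0
  · rw [if_pos hk]
    have : k.toNat = 0 := Int.toNat_of_nonpos hk
    rw [this]
    simp only [fLoop]
    rw [PySem.Dict.keys_counter]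
  · rw [if_neg hk]
    by_cases hab : a0 < b0
    · rw [if_pos hab]
      have hlen := fLoop_len_gt k.toNat (PySem.Dict.counter lst) a0 b0
        (by rw [PySem.Dict.keys_counter]; exact ha0max) hab
        (by rw [PySem.Dict.keys_counter]; exact hb0)
      rw [hlen, PySem.Dict.keys_counter]
      push_cast
      rw [Int.toNat_of_nonneg (by omega)]
    · rw [if_neg hab]
      have hne : b0 ≠ a0 := fun h => hb0 (h ▸ ha0mem)
      have hba : b0 < a0 := lt_of_le_of_ne (not_lt.mp hab) hne
      have hkeys := fLoop_keys_lt a0 b0 hba k.toNat (PySem.Dict.counter lst)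
        (by omega)
      rw [hkeys, PySem.Dict.keys_counter]
      by_cases hmem : PySem.Int.floordiv (a0 + b0 + 1) 2 ∈ S
      · rw [PySem.Set.add_of_mem hmem,
            if_pos ((PySem.Set.contains_iff _ _).mpr hmem)]
        omega
      · rw [PySem.Set.add_of_not_mem hmem,
            if_neg (fun h => hmem ((PySem.Set.contains_iff _ _).mp h))]
        simp
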